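-- pv_equiv track=rewrite | github.com/Zod1s/Python | temp/allZeroes.py | columnZero
-- ===== SOURCE A (Python) =====
-- def columnZero(A):
--     i = 0
--     j = 0
--     n = len(A)
--     while i < n and j < n:
--         if A[i][j] == 0:
--             i += 1
--         else:
--             j += 1
--             i = 0
--     return j if j < n else -1
-- ===== SOURCE B (Python) =====
-- def columnZero(A):
--     n = len(A)
--     nonzero = [False] * n
--     for row in A:
--         for j in range(min(n, len(row))):
--             if row[j] != 0:
--                 nonzero[j] = True
--     for j in range(n):
--         if not nonzero[j]:
--             return j
--     return -1
-- ===== Notes on version B (the rewrite author's own statement) =====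
-- stated objective: alternative
-- what changed: Replaces the column-wise two-pointer staircase walk by one row-major pass that accumulates a per-column nonzero flag array, followed by a scan for the first unflagged column.
import Mathlib
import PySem

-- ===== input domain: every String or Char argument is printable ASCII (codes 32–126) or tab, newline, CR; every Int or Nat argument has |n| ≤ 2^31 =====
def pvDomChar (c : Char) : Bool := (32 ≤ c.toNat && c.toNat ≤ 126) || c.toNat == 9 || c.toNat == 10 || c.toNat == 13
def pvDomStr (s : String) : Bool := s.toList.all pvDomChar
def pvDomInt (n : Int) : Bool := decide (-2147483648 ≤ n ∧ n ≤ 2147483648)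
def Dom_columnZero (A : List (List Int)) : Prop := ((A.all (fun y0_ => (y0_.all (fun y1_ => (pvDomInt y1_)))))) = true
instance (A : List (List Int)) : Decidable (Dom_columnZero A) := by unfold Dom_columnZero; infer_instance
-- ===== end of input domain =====

-- B replaces A's column-wise two-pointer staircase by one row-major pass building a
-- per-column nonzero flag array, then a scan for the first unflagged column; objective: alternative.


-- ===== PORT A =====
-- the while loop, step for step; list indexing via getD is exact here because Pre_
-- guarantees every index A[i][j] the loop reads is in range
def goA (A : List (List Int)) (n i j : Nat) : Int :=
  if hc : i < n ∧ j < n then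
    if (A.getD i []).getD j 0 = 0 then goA A n (i + 1) j
    else goA A n 0 (j + 1)
  else if j < n then (j : Int) else -1
termination_by (n - j, n - i)
decreasing_by
  · exact Prod.Lex.right _ (by omega)
  · exact Prod.Lex.left _ _ (by omega)

def columnZero (A : List (List Int)) : Int := goA A A.length 0 0

-- ===== PORT B =====
-- the inner loop of Source B: mark every column j < min(n, len(row)) where row[j] ≠ 0
def markRow (n : Nat) (flags : List Bool) (row : List Int) : List Bool :=
  (List.range (Nat.min n row.length)).foldl
    (fun fl j => if row.getD j 0 ≠ 0 then fl.set j true else fl) flags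

def columnZero_alt (A : List (List Int)) : Int :=
  let n := A.length
  let flags := A.foldl (markRow n) (List.replicate n false)
  match (List.range n).find? (fun j => !(flags.getD j false)) with
  | some j => (j : Int)
  | none => -1

-- ===== PRECONDITION & SPEC =====
-- entry (i, j) exists and is zero
def rowOk (A : List (List Int)) (j i : Nat) : Prop :=
  j < (A.getD i []).length ∧ (A.getD i []).getD j 0 = 0
-- column j is fully present and all zero (A returns j if its walk reaches column j)
def colOkFull (A : List (List Int)) (j : Nat) : Prop := ∀ i < A.length, rowOk A j i
-- scanning column j top-down hits an in-range nonzero entry before any short row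
def colAdv (A : List (List Int)) (j : Nat) : Prop :=
  ∃ i < A.length, j < (A.getD i []).length ∧ (A.getD i []).getD j 0 ≠ 0 ∧ ∀ i' < i, rowOk A j i'
-- Pre_ excludes exactly the ragged inputs on which A's column walk steps past the end of a
-- short row and raises IndexError: every column must be preceded by a fully-zero column
-- (where the walk stops) or itself advance the walk via an in-range nonzero entry.
def Pre_columnZero (A : List (List Int)) : Prop :=
  ∀ j < A.length, (∃ j' ≤ j, colOkFull A j') ∨ colAdv A j
instance (A : List (List Int)) : Decidable (Pre_columnZero A) := by
  unfold Pre_columnZero colOkFull colAdv rowOk; infer_instance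

def pvWitness_columnZero : List (List Int) := [[0, 1], [0, 0]]

def Spec_columnZero (A : List (List Int)) (out : Int) : Prop := out = columnZero_alt A
instance (A : List (List Int)) (out : Int) : Decidable (Spec_columnZero A out) := by unfold Spec_columnZero; infer_instance

-- ===== CLAIM (what is proved, stated in full; the proofs are below) =====
def Claim_equal_columnZero : Prop := ∀ (A : List (List Int)), Dom_columnZero A → Pre_columnZero A → Spec_columnZero A (columnZero A)

-- ===== LEMMAS AND PROOFS =====

-- the common specification: first column index in [j, n) whose first n entries are all zero
def colZ (A : List (List Int)) (n j : Nat) : Bool :=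
  (List.range n).all (fun i => (A.getD i []).getD j 0 == 0)

def specF (A : List (List Int)) (n j : Nat) : Int :=
  match (List.range' j (n - j)).find? (colZ A n) with
  | some k => (k : Int)
  | none => -1

lemma specF_base (A : List (List Int)) (n j : Nat) (hj : j ≤ n)
    (hall : j < n → colZ A n j = true) :
    (if j < n then (j : Int) else -1) = specF A n j := by
  by_cases hjn : j < n
  · have hr : n - j = (n - (j + 1)) + 1 := by omega
    rw [if_pos hjn]
    unfold specF
    rw [hr, List.range'_succ, List.find?_cons_of_pos (hall hjn)]
  · have hjn' : j = n := by omega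
    rw [if_neg hjn]
    unfold specF
    simp [hjn']

lemma goA_eq (A : List (List Int)) (n : Nat) :
    ∀ dj di i j, n - j ≤ dj → n - i ≤ di → i ≤ n → j ≤ n →
      (∀ i' < i, (A.getD i' []).getD j 0 = 0) → goA A n i j = specF A n j := by
  intro dj
  induction dj with
  | zero =>
    intro di i j hdj hdi hi hj hz
    have hjn : j = n := by omega
    rw [goA, dif_neg (by omega)]
    exact specF_base A n j hj (by omega)
  | succ dj ihj =>
    intro di
    induction di with
    | zero =>
      intro i j hdj hdi hi hj hz
      have hin : i = n := by omega
      rw [goA, dif_neg (by omega)]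
      apply specF_base A n j hj
      intro hjn
      simp only [colZ, List.all_eq_true, List.mem_range]
      intro k hk
      simpa using hz k (by omega)
    | succ di ihi =>
      intro i j hdj hdi hi hj hz
      rw [goA]
      by_cases h : i < n ∧ j < n
      · rw [dif_pos h]
        by_cases hv : (A.getD i []).getD j 0 = 0
        · rw [if_pos hv]
          apply ihi (i + 1) j hdj (by omega) (by omega) hj
          intro i' hi'
          rcases Nat.lt_succ_iff_lt_or_eq.mp hi' with h' | h'
          · exact hz i' h'
          · rw [h']; exact hv
        · rw [if_neg hv]
          have hstep : specF A n j = specF A n (j + 1) := by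
            have hcz : colZ A n j = false := by
              simp only [colZ, List.all_eq_false, List.mem_range]
              exact ⟨i, h.1, by simpa using hv⟩
            have hr : n - j = (n - (j + 1)) + 1 := by omega
            unfold specF
            rw [hr, List.range'_succ, List.find?_cons_of_neg (by simp [hcz])]
          rw [hstep]
          apply ihj n 0 (j + 1) (by omega) (by omega) (by omega) (by omega)
          intro i' hi'
          omega
      · rw [dif_neg h]
        apply specF_base A n j hj
        intro hjn
        have hin : i = n := by omega
        simp only [colZ, List.all_eq_true, List.mem_range]
        intro k hk
        simpa using hz k (by omega)

lemma columnZero_eq_specF (A : List (List Int)) :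
    columnZero A = specF A A.length 0 := by
  exact goA_eq A A.length A.length A.length 0 0 (by omega) (by omega) (by omega) (by omega)
    (by intro i' h; omega)

-- the inner marking fold: flag j ends up true iff it started true or j < m and q j
lemma setFoldLen (q : Nat → Prop) [DecidablePred q] (l : List Nat) :
    ∀ (fl : List Bool),
      ((l.foldl (fun fl k => if q k then fl.set k true else fl) fl).length) = fl.length := by
  induction l with
  | nil => intro fl; rfl
  | cons a l ih =>
    intro fl
    rw [List.foldl_cons, ih]
    split <;> simp

lemma setFold_getD (q : Nat → Prop) [DecidablePred q] :
    ∀ (m : Nat) (fl : List Bool) (j : Nat), m ≤ fl.length →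
      (((List.range m).foldl (fun fl k => if q k then fl.set k true else fl) fl).getD j false)
        = (fl.getD j false || (decide (j < m) && decide (q j))) := by
  intro m
  induction m with
  | zero => simp
  | succ m ih =>
    intro fl j hm
    rw [List.range_succ, List.foldl_append, List.foldl_cons, List.foldl_nil]
    have hlen := setFoldLen q (List.range m) fl
    by_cases hj : j = m
    · subst hj
      by_cases hq : q j
      · rw [if_pos hq, List.getD_eq_getElem?_getD, List.getElem?_set_self (by omega)]
        simp [hq, Nat.lt_succ_self]
      · rw [if_neg hq, ih fl j (by omega)]
        simp [hq]
    · have hd : decide (j < m + 1) = decide (j < m) := by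
        have : (j < m + 1) ↔ (j < m) := by omega
        simp [this]
      rw [hd]
      by_cases hq : q m
      · rw [if_pos hq, List.getD_eq_getElem?_getD,
            List.getElem?_set_ne (fun h => hj h.symm), ← List.getD_eq_getElem?_getD,
            ih fl j (by omega)]
      · rw [if_neg hq, ih fl j (by omega)]

lemma markRow_length (n : Nat) (fl : List Bool) (row : List Int) :
    (markRow n fl row).length = fl.length := by
  unfold markRow
  exact setFoldLen (fun k => row.getD k 0 ≠ 0) _ fl

lemma markRow_getD (n : Nat) (fl : List Bool) (row : List Int) (j : Nat)
    (hn : n ≤ fl.length) :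
    (markRow n fl row).getD j false
      = (fl.getD j false
          || (decide (j < Nat.min n row.length) && decide (row.getD j 0 ≠ 0))) := by
  unfold markRow
  exact setFold_getD (fun k => row.getD k 0 ≠ 0) (Nat.min n row.length) fl j
    (le_trans (Nat.min_le_left _ _) hn)

lemma foldl_markRow_getD (n : Nat) :
    ∀ (rs : List (List Int)) (fl : List Bool) (j : Nat), n ≤ fl.length →
      ((rs.foldl (markRow n) fl).getD j false)
        = (fl.getD j false
            || rs.any (fun row =>
                decide (j < Nat.min n row.length) && decide (row.getD j 0 ≠ 0))) := by
  intro rs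
  induction rs with
  | nil => simp
  | cons r rs ih =>
    intro fl j hn
    rw [List.foldl_cons, ih (markRow n fl r) j (by rw [markRow_length]; exact hn),
        markRow_getD n fl r j hn]
    simp [Bool.or_assoc]

-- the final flag array read back as the column-zero test of the spec
lemma flags_getD (A : List (List Int)) (j : Nat) (hj : j < A.length) :
    (!((A.foldl (markRow A.length) (List.replicate A.length false)).getD j false))
      = colZ A A.length j := by
  rw [foldl_markRow_getD A.length A (List.replicate A.length false) j (by simp)]
  have hrep : (List.replicate A.length false).getD j false = false := by
    rw [List.getD_eq_getElem?_getD, List.getElem?_replicate]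
    split <;> rfl
  rw [hrep, Bool.false_or]
  have key : (A.any (fun row =>
        decide (j < Nat.min A.length row.length) && decide (row.getD j 0 ≠ 0))) = true
      ↔ (colZ A A.length j) = false := by
    rw [List.any_eq_true]
    unfold colZ
    rw [List.all_eq_false]
    constructor
    · rintro ⟨row, hrow, hP⟩
      obtain ⟨i, hi, rfl⟩ := List.mem_iff_getElem.mp hrow
      rw [Bool.and_eq_true, decide_eq_true_eq, decide_eq_true_eq] at hP
      refine ⟨i, List.mem_range.mpr hi, ?_⟩
      have hAi : A.getD i [] = A[i] := by
        rw [List.getD_eq_getElem?_getD, List.getElem?_eq_getElem hi, Option.getD_some]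
      rw [hAi]
      simp only [Bool.not_eq_true, beq_eq_false_iff_ne]
      exact hP.2
    · rintro ⟨i, hi, hne⟩
      rw [List.mem_range] at hi
      rw [Bool.not_eq_true, beq_eq_false_iff_ne] at hne
      have hlt : j < (A.getD i []).length := by
        by_contra hge
        apply hne
        rw [List.getD_eq_getElem?_getD, List.getElem?_eq_none (by omega)]
        rfl
      refine ⟨A.getD i [], ?_, ?_⟩
      · rw [List.getD_eq_getElem?_getD, List.getElem?_eq_getElem hi, Option.getD_some]
        exact List.getElem_mem hi
      · rw [Bool.and_eq_true, decide_eq_true_eq, decide_eq_true_eq, Nat.lt_min]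
        exact ⟨⟨hj, hlt⟩, hne⟩
  cases h1 : (A.any (fun row =>
      decide (j < Nat.min A.length row.length) && decide (row.getD j 0 ≠ 0))) <;>
    cases h2 : colZ A A.length j
  · have := key.mpr h2; rw [h1] at this; cases this
  · rfl
  · rfl
  · have := key.mp h1; rw [h2] at this; cases this

lemma find?_congr_mem {α : Type} (l : List α) (p q : α → Bool)
    (h : ∀ a ∈ l, p a = q a) : l.find? p = l.find? q := by
  induction l with
  | nil => rfl
  | cons a l ih =>
    rw [List.find?_cons, List.find?_cons, h a (List.mem_cons_self),
        ih (fun b hb => h b (List.mem_cons_of_mem a hb))]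

lemma alt_eq_specF (A : List (List Int)) :
    columnZero_alt A = specF A A.length 0 := by
  have h := find?_congr_mem (List.range A.length)
      (fun j => !((A.foldl (markRow A.length) (List.replicate A.length false)).getD j false))
      (colZ A A.length) (fun j hj => flags_getD A j (List.mem_range.mp hj))
  unfold columnZero_alt specF
  simp only [Nat.sub_zero, ← List.range_eq_range', h]

-- ===== VERDICT (by name: the statement is the Claim_ definition above) =====
theorem columnZero_spec : Claim_equal_columnZero := by
  intro A _ _
  unfold Spec_columnZero
  rw [columnZero_eq_specF, alt_eq_specF]
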